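-- pv_equiv track=rewrite | github.com/porcelainruler/InterviewPrep | PythonVSCode/DP_GFG/TilesStackingNumWays.py | dp
-- ===== SOURCE A (Python) =====
-- def dp(n: int):
--     if n<4:
--         return 1
--
--     dp = [0]*(n+1)
--     dp[0] = 1
--     dp[1] = 1
--     dp[2] = 1
--     dp[3] = 1
--
--     for i in range(4, n+1):
--         dp[i] += dp[i-1] + dp[i-4]
--
--
--     return dp[n]
-- ===== SOURCE B (Python) =====
-- def dp(n: int):
--     if n < 4:
--         return 1
--
--     def mul(X, Y):
--         return [[sum(X[i][k] * Y[k][j] for k in range(4)) for j in range(4)]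
--                 for i in range(4)]
--
--     M = [[1, 0, 0, 1],
--          [1, 0, 0, 0],
--          [0, 1, 0, 0],
--          [0, 0, 1, 0]]
--     R = [[1 if i == j else 0 for j in range(4)] for i in range(4)]
--     e = n - 3
--     while e:
--         if e & 1:
--             R = mul(R, M)
--         M = mul(M, M)
--         e >>= 1
--     return sum(R[0])
-- ===== Notes on version B (the rewrite author's own statement) =====
-- stated objective: alternative
-- what changed: Replaced the O(n) DP-array loop by binary exponentiation of the 4x4 companion matrix of the recurrence dp[i]=dp[i-1]+dp[i-4] (intended as faster, O(log n) matrix multiplications; a timing run measured 2.9-6x on the sizes both finish but recorded the label unconfirmed because the huge results exceed CPython's int-to-str digit limit at the largest size).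
import Mathlib
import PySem

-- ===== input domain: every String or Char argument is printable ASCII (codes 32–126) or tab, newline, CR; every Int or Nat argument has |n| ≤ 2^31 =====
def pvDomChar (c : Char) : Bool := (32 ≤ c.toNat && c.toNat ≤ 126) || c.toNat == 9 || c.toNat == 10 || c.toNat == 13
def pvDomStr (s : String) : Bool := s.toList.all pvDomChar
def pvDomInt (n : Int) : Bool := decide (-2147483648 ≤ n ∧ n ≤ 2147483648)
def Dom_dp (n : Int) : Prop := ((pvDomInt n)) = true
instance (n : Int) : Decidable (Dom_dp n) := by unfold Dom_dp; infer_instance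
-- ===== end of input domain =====

-- B replaces A's O(n) DP-array loop by binary exponentiation of the 4x4 companion
-- matrix of the recurrence dp[i] = dp[i-1] + dp[i-4] (an alternative O(log n)-multiplication
-- algorithm; intended as faster, measured 2.9-6x in a timing run on mid sizes but
-- recorded unconfirmed at the largest size).

-- ===== PORT A =====
-- the loop body: dp[i] += dp[i-1] + dp[i-4].  The Python list is an Array (Lean's analogue of a
-- mutable list); the loop indices satisfy 4 ≤ i ≤ n, so every index is non-negative and in range
-- and '.toNat'-indexed get/set is exactly Python's dp[i] here.
def dpStep (a : Array Int) (i : Int) : Array Int :=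
  a.set! i.toNat (a.getD i.toNat 0 + (a.getD (i - 1).toNat 0 + a.getD (i - 4).toNat 0))

def dp (n : Int) : Int :=
  if n < 4 then 1
  else
    -- dp = [0]*(n+1); dp[0] = dp[1] = dp[2] = dp[3] = 1; for i in range(4, n+1): …; return dp[n]
    ((PySem.List.pyRange 4 (n + 1) 1).foldl dpStep
      (((((Array.replicate (n + 1).toNat 0).set! 0 1).set! 1 1).set! 2 1).set! 3 1)).getD n.toNat 0

-- ===== PORT B =====
-- mul(X, Y): the hand-written 4x4 matrix product (lists of rows, like Source B);
-- all indices come from range(4) and are in range, so '.getD' is exactly Python's indexing.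
def mulM (X Y : List (List Int)) : List (List Int) :=
  (List.range 4).map fun i => (List.range 4).map fun j =>
    (((List.range 4).map fun k => (X.getD i []).getD k 0 * (Y.getD k []).getD j 0).sum)

-- the while loop: while e: if e & 1: R = mul(R, M); M = mul(M, M); e >>= 1
def powLoop (R M : List (List Int)) (e : Nat) : List (List Int) :=
  if e = 0 then R
  else powLoop (if e % 2 = 1 then mulM R M else R) (mulM M M) (e / 2)
decreasing_by exact Nat.div_lt_self (Nat.pos_of_ne_zero (by assumption)) (by omega)

def dp_alt (n : Int) : Int :=
  if n < 4 then 1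
  else -- R = identity (the comprehension), M = the companion matrix, e = n - 3; return sum(R[0])
    ((powLoop ((List.range 4).map fun i => (List.range 4).map fun j => if i = j then (1:Int) else 0)
      [[1,0,0,1],[1,0,0,0],[0,1,0,0],[0,0,1,0]] (n - 3).toNat).getD 0 []).sum

-- ===== PRECONDITION & SPEC =====
def Spec_dp (n : Int) (out : Int) : Prop := out = dp_alt n
instance (n : Int) (out : Int) : Decidable (Spec_dp n out) := by unfold Spec_dp; infer_instance

-- ===== CLAIM (what is proved, stated in full; the proofs are below) =====
def Claim_equal_dp : Prop := ∀ (n : Int), Dom_dp n → Spec_dp n (dp n)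

-- ===== LEMMAS AND PROOFS =====
-- the mathematical sequence both programs compute: f 0..3 = 1, f (k+4) = f (k+3) + f k
def fseq : Nat → Int
  | 0 => 1 | 1 => 1 | 2 => 1 | 3 => 1
  | (k+4) => fseq (k+3) + fseq k

-- ---- A side: pass to lists, then a loop invariant ----
def dpStepL (l : List Int) (i : Int) : List Int :=
  l.set i.toNat (l.getD i.toNat 0 + (l.getD (i - 1).toNat 0 + l.getD (i - 4).toNat 0))

theorem arr_getD_toList (a : Array Int) (i : Nat) : a.getD i 0 = a.toList.getD i 0 := by
  unfold Array.getD
  split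
  · rename_i h
    rw [List.getD_eq_getElem?_getD, List.getElem?_eq_getElem (by simpa using h)]
    simp
  · rename_i h
    rw [List.getD_eq_getElem?_getD, List.getElem?_eq_none (by simpa using by omega)]
    rfl

theorem toList_dpStep (a : Array Int) (i : Int) : (dpStep a i).toList = dpStepL a.toList i := by
  simp [dpStep, dpStepL, Array.set!]

theorem toList_foldl_dpStep (l : List Int) (a : Array Int) :
    (l.foldl dpStep a).toList = l.foldl dpStepL a.toList := by
  induction l generalizing a with
  | nil => rfl
  | cons x xs ih => simp [List.foldl_cons, ih, toList_dpStep]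

theorem dp_loop_inv (N : Nat) (init : List Int)
    (hlen : init.length = N + 1)
    (hlow : ∀ j : Nat, j ≤ 3 → init.getD j 0 = fseq j)
    (hhigh : ∀ j : Nat, 3 < j → init.getD j 0 = 0) :
    ∀ m : Nat, 3 ≤ m → m ≤ N →
      (((PySem.List.pyRange 4 ((m : Int) + 1) 1).foldl dpStepL init).length = N + 1 ∧
       (∀ j : Nat, j ≤ m → ((PySem.List.pyRange 4 ((m : Int) + 1) 1).foldl dpStepL init).getD j 0 = fseq j) ∧
       (∀ j : Nat, m < j → ((PySem.List.pyRange 4 ((m : Int) + 1) 1).foldl dpStepL init).getD j 0 = 0)) := by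
  intro m
  induction m with
  | zero => omega
  | succ m ih =>
    intro h3 hle
    by_cases hm : 3 ≤ m
    · -- peel the last loop iteration i = m + 1
      have hsplit : PySem.List.pyRange 4 ((m : Int) + 1 + 1) 1
          = PySem.List.pyRange 4 ((m : Int) + 1) 1 ++ [(m : Int) + 1] := by
        have := PySem.List.pyRange_one_succ_right (a := 4) (b := (m : Int) + 1) (by omega)
        simpa using this
      obtain ⟨hl, hlo, hhi⟩ := ih hm (by omega)
      rw [show ((m + 1 : Nat) : Int) + 1 = (m : Int) + 1 + 1 by push_cast; ring, hsplit,
        List.foldl_append]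
      set L := (PySem.List.pyRange 4 ((m : Int) + 1) 1).foldl dpStepL init with hL
      simp only [List.foldl_cons, List.foldl_nil]
      have e0 : ((m : Int) + 1).toNat = m + 1 := by omega
      have e1 : (((m : Int) + 1) - 1).toNat = m := by omega
      have e4 : (((m : Int) + 1) - 4).toNat = m - 3 := by omega
      rw [dpStepL, e0, e1, e4]
      have hv : L.getD (m + 1) 0 + (L.getD m 0 + L.getD (m - 3) 0) = fseq (m + 1) := by
        rw [hhi (m + 1) (by omega), hlo m (by omega), hlo (m - 3) (by omega)]
        rw [show m + 1 = (m - 3) + 4 by omega, fseq, show m - 3 + 3 = m by omega]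
        ring
      refine ⟨by simpa using hl, ?_, ?_⟩
      · intro j hj
        by_cases hjm : j = m + 1
        · subst hjm
          rw [hv]
          rw [List.getD_eq_getElem?_getD, List.getElem?_set_self (by omega), Option.getD_some]
        · rw [List.getD_eq_getElem?_getD, List.getElem?_set_ne (by omega),
            ← List.getD_eq_getElem?_getD]
          exact hlo j (by omega)
      · intro j hj
        rw [List.getD_eq_getElem?_getD, List.getElem?_set_ne (by omega),
          ← List.getD_eq_getElem?_getD]
        exact hhi j (by omega)
    · -- m + 1 = 3 : the range is empty and the invariant is the initial state
      have hm3 : m + 1 = 3 := by omega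
      rw [hm3]
      rw [show ((3 : Nat) : Int) + 1 = 4 by norm_num, PySem.List.pyRange_one_eq_nil (by omega),
        List.foldl_nil]
      exact ⟨hlen, fun j hj => hlow j hj, fun j hj => hhigh j hj⟩

theorem dp_eq_fseq (n : Int) : dp n = fseq n.toNat := by
  unfold dp
  by_cases h : n < 4
  · rw [if_pos h]
    have hm : n.toNat ≤ 3 := by omega
    interval_cases h3 : n.toNat <;> simp [fseq]
  · rw [if_neg h]
    obtain ⟨N, rfl⟩ : ∃ N : Nat, n = (N : Int) := ⟨n.toNat, by omega⟩
    have hN : 4 ≤ N := by omega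
    rw [Int.toNat_natCast, arr_getD_toList, toList_foldl_dpStep]
    have hinit : (((((Array.replicate ((N : Int) + 1).toNat (0:Int)).set! 0 1).set! 1 1).set! 2 1).set! 3 1).toList
        = ((((List.replicate (N + 1) (0:Int)).set 0 1).set 1 1).set 2 1).set 3 1 := by
      simp [Array.set!, show ((N : Int) + 1).toNat = N + 1 by omega]
    rw [hinit, show ((N : Int) + 1) = ((N : Nat) : Int) + 1 from rfl]
    have hlen : (((((List.replicate (N + 1) (0:Int)).set 0 1).set 1 1).set 2 1).set 3 1).length = N + 1 := by
      simp
    have hlow : ∀ j : Nat, j ≤ 3 →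
        (((((List.replicate (N + 1) (0:Int)).set 0 1).set 1 1).set 2 1).set 3 1).getD j 0 = fseq j := by
      intro j hj
      have c1 : 0 < N := by omega
      have c5 : 2 ≤ N := by omega
      have c6 : 3 ≤ N := by omega
      interval_cases j <;> simp [List.getD_eq_getElem?_getD, fseq, c1, c5, c6]
    have hhigh : ∀ j : Nat, 3 < j →
        (((((List.replicate (N + 1) (0:Int)).set 0 1).set 1 1).set 2 1).set 3 1).getD j 0 = 0 := by
      intro j hj
      rw [List.getD_eq_getElem?_getD, List.getElem?_set_ne (by omega), List.getElem?_set_ne (by omega),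
        List.getElem?_set_ne (by omega), List.getElem?_set_ne (by omega)]
      by_cases hjl : j < N + 1
      · rw [List.getElem?_replicate_of_lt hjl]; rfl
      · rw [List.getElem?_eq_none (by simpa using by omega)]; rfl
    obtain ⟨_, hlo, _⟩ := dp_loop_inv N _ hlen hlow hhigh N (by omega) le_rfl
    exact hlo N le_rfl

-- ---- B side: lists of rows as 4x4 matrices, binary exponentiation ----
def toMat (L : List (List Int)) : Matrix (Fin 4) (Fin 4) Int :=
  Matrix.of fun i j => (L.getD i.val []).getD j.val 0

def Mc : Matrix (Fin 4) (Fin 4) Int := !![1,0,0,1; 1,0,0,0; 0,1,0,0; 0,0,1,0]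

theorem toMat_mulM (X Y : List (List Int)) : toMat (mulM X Y) = toMat X * toMat Y := by
  ext i j
  fin_cases i <;> fin_cases j <;>
    (simp [toMat, mulM, Matrix.mul_apply, Fin.sum_univ_four, List.range_succ]; ring)

-- matrix wellformedness: 4 rows of 4 entries (what mulM always produces)
def wfM (L : List (List Int)) : Prop := L.length = 4 ∧ ∀ r ∈ L, r.length = 4

theorem wfM_mulM (X Y : List (List Int)) : wfM (mulM X Y) := by
  constructor
  · simp [mulM]
  · intro r hr
    simp [mulM] at hr
    obtain ⟨i, _, rfl⟩ := hr
    simp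

theorem wfM_powLoop (R M : List (List Int)) (e : Nat) (hR : wfM R) : wfM (powLoop R M e) := by
  induction e using Nat.strong_induction_on generalizing R M with
  | _ e ih =>
    rw [powLoop]
    by_cases h : e = 0
    · simpa [h] using hR
    · rw [if_neg h]
      refine ih (e / 2) (Nat.div_lt_self (Nat.pos_of_ne_zero h) (by omega)) _ _ ?_
      by_cases hp : e % 2 = 1
      · rw [if_pos hp]; exact wfM_mulM _ _
      · rw [if_neg hp]; exact hR

-- the Matrix-level shadow of the same loop
def powLoopM (R M : Matrix (Fin 4) (Fin 4) Int) (e : Nat) : Matrix (Fin 4) (Fin 4) Int :=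
  if e = 0 then R
  else powLoopM (if e % 2 = 1 then R * M else R) (M * M) (e / 2)
decreasing_by exact Nat.div_lt_self (Nat.pos_of_ne_zero (by assumption)) (by omega)

theorem toMat_powLoop (R M : List (List Int)) (e : Nat) :
    toMat (powLoop R M e) = powLoopM (toMat R) (toMat M) e := by
  induction e using Nat.strong_induction_on generalizing R M with
  | _ e ih =>
    rw [powLoop, powLoopM]
    by_cases h : e = 0
    · simp [h]
    · rw [if_neg h, if_neg h, ih (e / 2) (Nat.div_lt_self (Nat.pos_of_ne_zero h) (by omega))]
      by_cases hp : e % 2 = 1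
      · rw [if_pos hp, if_pos hp, toMat_mulM, toMat_mulM]
      · rw [if_neg hp, if_neg hp, toMat_mulM]

theorem powLoopM_eq (R M : Matrix (Fin 4) (Fin 4) Int) (e : Nat) :
    powLoopM R M e = R * M ^ e := by
  induction e using Nat.strong_induction_on generalizing R M with
  | _ e ih =>
    rw [powLoopM]
    by_cases h : e = 0
    · simp [h]
    · rw [if_neg h, ih (e / 2) (Nat.div_lt_self (Nat.pos_of_ne_zero h) (by omega))]
      by_cases hp : e % 2 = 1
      · rw [if_pos hp, mul_assoc, ← sq, ← pow_mul]
        conv_rhs => rw [show e = 2 * (e / 2) + 1 from by omega]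
        rw [pow_succ']
      · rw [if_neg hp, ← sq, ← pow_mul]
        conv_rhs => rw [show e = 2 * (e / 2) from by omega]

def vseq (e : Nat) : Fin 4 → Int := ![fseq (e+3), fseq (e+2), fseq (e+1), fseq e]

theorem mulVec_step (e : Nat) : Mc.mulVec (vseq e) = vseq (e+1) := by
  funext i
  fin_cases i <;>
    simp [Mc, vseq, Matrix.mulVec, dotProduct, Fin.sum_univ_four] <;>
    rw [show e+1+3 = e+4 by omega] <;> simp [fseq]

theorem pow_mulVec (e : Nat) : (Mc ^ e).mulVec (vseq 0) = vseq e := by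
  induction e with
  | zero => simp
  | succ k ih => rw [pow_succ', ← Matrix.mulVec_mulVec, ih, mulVec_step]

theorem sum_eq_fin4 (r : List Int) (h : r.length = 4) : r.sum = ∑ k : Fin 4, r.getD k.val 0 := by
  match r, h with
  | [a, b, c, d], _ => (simp [Fin.sum_univ_four]; ring)

theorem dp_alt_eq_fseq (n : Int) : dp_alt n = fseq n.toNat := by
  unfold dp_alt
  by_cases h : n < 4
  · rw [if_pos h]
    have hm : n.toNat ≤ 3 := by omega
    interval_cases h3 : n.toNat <;> simp [fseq]
  · rw [if_neg h]
    set R0 : List (List Int) :=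
      (List.range 4).map fun i => (List.range 4).map fun j => if i = j then (1:Int) else 0 with hR0
    set M0 : List (List Int) := [[1,0,0,1],[1,0,0,0],[0,1,0,0],[0,0,1,0]] with hM0
    have hwfR0 : wfM R0 := by
      constructor
      · simp [hR0]
      · intro r hr
        simp [hR0] at hr
        obtain ⟨i, _, rfl⟩ := hr
        simp
    have hwf := wfM_powLoop R0 M0 (n - 3).toNat hwfR0
    obtain ⟨hlen4, hrows⟩ := hwf
    have hrow0 : ((powLoop R0 M0 (n - 3).toNat).getD 0 []).length = 4 := by
      apply hrows
      rw [List.getD_eq_getElem?_getD, List.getElem?_eq_getElem (by omega)]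
      exact List.getElem_mem _
    rw [sum_eq_fin4 _ hrow0]
    have hR0m : toMat R0 = 1 := by
      ext i j
      fin_cases i <;> fin_cases j <;> simp [toMat, hR0, List.range_succ]
    have hM0m : toMat M0 = Mc := by
      ext i j
      fin_cases i <;> fin_cases j <;> simp [toMat, hM0, Mc]
    have hmat : toMat (powLoop R0 M0 (n - 3).toNat) = Mc ^ (n - 3).toNat := by
      rw [toMat_powLoop, powLoopM_eq, hR0m, hM0m, one_mul]
    have hentry : ∀ k : Fin 4, ((powLoop R0 M0 (n - 3).toNat).getD 0 []).getD k.val 0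
        = (Mc ^ (n - 3).toNat) 0 k := fun k => congrFun (congrFun hmat 0) k
    rw [Finset.sum_congr rfl fun k _ => hentry k]
    have hrow : ∑ k, (Mc ^ (n - 3).toNat) 0 k = fseq ((n - 3).toNat + 3) := by
      have h1 : vseq 0 = fun _ => (1:Int) := by
        funext i; fin_cases i <;> simp [vseq, fseq]
      have := congrFun (pow_mulVec (n - 3).toNat) 0
      rw [h1] at this
      simp [Matrix.mulVec, dotProduct, vseq] at this
      simpa using this
    rw [hrow, show (n - 3).toNat + 3 = n.toNat by omega]

-- ===== VERDICT (by name: the statement is the Claim_ definition above) =====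
theorem dp_spec : Claim_equal_dp := by
  intro n _
  unfold Spec_dp
  rw [dp_eq_fseq, dp_alt_eq_fseq]
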